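-- pv_equiv track=rewrite | github.com/hscspring/The-DataStructure-and-Algorithms | Lab/adventofcode2020/day1.py | add_three_is
-- ===== SOURCE A (Python) =====
-- def add_three_is(year: int, nums: list) -> int:
--
--     lst = set()
--     for i in nums:
--         need = year - i
--         for j in nums:
--             if need - j in nums:
--                 pair = sorted((i, j, need-j))
--                 lst.add(tuple(pair))
--     res = []
--     for pair in lst:
--         res.append(pair[0] * pair[1] * pair[2])
--     return max(res)
-- ===== SOURCE B (Python) =====
-- def add_three_is(year: int, nums: list) -> int:
--     vals = sorted(set(nums))
--     n = len(vals)
--     prods = [vals[i] * vals[j] * vals[k]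
--              for i in range(n)
--              for j in range(i, n)
--              for k in range(j, n)
--              if vals[i] + vals[j] + vals[k] == year]
--     return max(prods)
-- ===== Notes on version B (the rewrite author's own statement) =====
-- stated objective: simpler
-- what changed: B drops A's complement-lookup trick (need = year-i-j tested for membership, dedup via a set of sorted tuples) and instead enumerates ordered triples i<=j<=k over the sorted distinct values once, collecting products and taking their max.
import Mathlib
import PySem

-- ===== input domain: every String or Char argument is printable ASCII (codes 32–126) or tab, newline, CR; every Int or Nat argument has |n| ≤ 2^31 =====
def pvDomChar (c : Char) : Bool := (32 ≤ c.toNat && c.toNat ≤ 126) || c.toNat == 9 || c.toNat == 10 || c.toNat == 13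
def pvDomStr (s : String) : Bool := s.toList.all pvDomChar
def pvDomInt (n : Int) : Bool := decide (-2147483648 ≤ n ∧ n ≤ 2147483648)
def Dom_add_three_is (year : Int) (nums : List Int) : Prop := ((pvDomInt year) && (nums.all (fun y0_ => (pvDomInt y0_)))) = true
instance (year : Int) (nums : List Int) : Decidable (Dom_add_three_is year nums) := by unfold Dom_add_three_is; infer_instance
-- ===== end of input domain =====

-- B replaces A's complement-lookup over a set of sorted tuples with a direct enumeration of
-- ordered triples i ≤ j ≤ k over the sorted distinct values (simpler: no membership test, no tuple set).


-- ===== PORT A =====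
def add_three_is (year : Int) (nums : List Int) : Int :=
  let lst : PySem.Set (List Int) :=
    nums.foldl (fun lst i =>
      let need := year - i
      nums.foldl (fun lst j =>
        if need - j ∈ nums then
          let pair := PySem.List.sorted [i, j, need - j] (fun x => x) false
          PySem.Set.add lst pair
        else lst) lst) PySem.Set.empty
  let res : List Int := lst.foldl (fun res pair =>
    res ++ [PySem.List.pyGetD pair 0 0 * PySem.List.pyGetD pair 1 0 * PySem.List.pyGetD pair 2 0]) []
  -- max(res); Pre_ guarantees res ≠ [] (Python raises ValueError on empty res)
  (PySem.List.max? res (fun x => x)).getD 0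

-- ===== PORT B =====
def add_three_is_alt (year : Int) (nums : List Int) : Int :=
  let vals : List Int := PySem.List.sorted (PySem.Set.ofList nums) (fun x => x) false
  let n : Int := vals.length
  let prods : List Int :=
    (PySem.List.pyRange 0 n 1).flatMap (fun i =>
      (PySem.List.pyRange i n 1).flatMap (fun j =>
        (PySem.List.pyRange j n 1).flatMap (fun k =>
          if PySem.List.pyGetD vals i 0 + PySem.List.pyGetD vals j 0 + PySem.List.pyGetD vals k 0 = year
          then [PySem.List.pyGetD vals i 0 * PySem.List.pyGetD vals j 0 * PySem.List.pyGetD vals k 0]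
          else [])))
  -- max(prods); Pre_ guarantees prods ≠ []
  (PySem.List.max? prods (fun x => x)).getD 0

-- ===== PRECONDITION & SPEC =====
-- Pre_ excludes exactly the inputs with no triple i, j, year-i-j in nums: there Python A's
-- max([]) raises ValueError (B's max raises identically).
def Pre_add_three_is (year : Int) (nums : List Int) : Prop :=
  ∃ i ∈ nums, ∃ j ∈ nums, year - i - j ∈ nums
instance (year : Int) (nums : List Int) : Decidable (Pre_add_three_is year nums) := by
  unfold Pre_add_three_is; infer_instance
def pvWitness_add_three_is : Int × List Int := (6, [1, 2, 3])

def Spec_add_three_is (year : Int) (nums : List Int) (out : Int) : Prop := out = add_three_is_alt year nums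
instance (year : Int) (nums : List Int) (out : Int) : Decidable (Spec_add_three_is year nums out) := by unfold Spec_add_three_is; infer_instance

-- ===== CLAIM (what is proved, stated in full; the proofs are below) =====
def Claim_equal_add_three_is : Prop := ∀ (year : Int) (nums : List Int), Dom_add_three_is year nums → Pre_add_three_is year nums → Spec_add_three_is year nums (add_three_is year nums)

-- ===== LEMMAS AND PROOFS =====

-- A's res list and B's prods list, named for the proofs (definitionally the ones in the ports).
def pvResA (year : Int) (nums : List Int) : List Int :=
  (nums.foldl (fun lst i =>
      nums.foldl (fun lst j =>
        if year - i - j ∈ nums then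
          PySem.Set.add lst (PySem.List.sorted [i, j, year - i - j] (fun x => x) false)
        else lst) lst) (PySem.Set.empty : PySem.Set (List Int))).foldl (fun res pair =>
    res ++ [PySem.List.pyGetD pair 0 0 * PySem.List.pyGetD pair 1 0 * PySem.List.pyGetD pair 2 0]) []

def pvVals (nums : List Int) : List Int := PySem.List.sorted (PySem.Set.ofList nums) (fun x => x) false

def pvProdsB (year : Int) (nums : List Int) : List Int :=
  (PySem.List.pyRange 0 (pvVals nums).length 1).flatMap (fun i =>
    (PySem.List.pyRange i (pvVals nums).length 1).flatMap (fun j =>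
      (PySem.List.pyRange j (pvVals nums).length 1).flatMap (fun k =>
        if PySem.List.pyGetD (pvVals nums) i 0 + PySem.List.pyGetD (pvVals nums) j 0 + PySem.List.pyGetD (pvVals nums) k 0 = year
        then [PySem.List.pyGetD (pvVals nums) i 0 * PySem.List.pyGetD (pvVals nums) j 0 * PySem.List.pyGetD (pvVals nums) k 0]
        else [])))

lemma add_three_is_eq (year : Int) (nums : List Int) :
    add_three_is year nums = (PySem.List.max? (pvResA year nums) (fun x => x)).getD 0 := rfl

lemma add_three_is_alt_eq (year : Int) (nums : List Int) :
    add_three_is_alt year nums = (PySem.List.max? (pvProdsB year nums) (fun x => x)).getD 0 := rfl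

-- the common characterisation: x is the product of a nondecreasing triple from nums summing to year
def pvTP (year : Int) (nums : List Int) (x : Int) : Prop :=
  ∃ a b c : Int, a ≤ b ∧ b ≤ c ∧ a ∈ nums ∧ b ∈ nums ∧ c ∈ nums ∧ a + b + c = year ∧ x = a * b * c

lemma mem_foldl_or {α β : Type} (f : List β → α → List β) (P : α → β → Prop)
    (hf : ∀ s a x, x ∈ f s a ↔ x ∈ s ∨ P a x) :
    ∀ (l : List α) (s : List β) (x : β), x ∈ l.foldl f s ↔ x ∈ s ∨ ∃ a ∈ l, P a x := by
  intro l
  induction l with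
  | nil => simp
  | cons a t ih =>
    intro s x
    simp only [List.foldl_cons, ih, hf, List.mem_cons]
    constructor
    · rintro ((h | h) | ⟨b, hb, h⟩)
      · exact Or.inl h
      · exact Or.inr ⟨a, Or.inl rfl, h⟩
      · exact Or.inr ⟨b, Or.inr hb, h⟩
    · rintro (h | ⟨b, (rfl | hb), h⟩)
      · exact Or.inl (Or.inl h)
      · exact Or.inl (Or.inr h)
      · exact Or.inr ⟨b, hb, h⟩

lemma mem_resA (year : Int) (nums : List Int) (x : Int) :
    x ∈ pvResA year nums ↔ pvTP year nums x := by
  have hset : ∀ p : List Int,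
      p ∈ nums.foldl (fun lst i =>
          nums.foldl (fun lst j =>
            if year - i - j ∈ nums then
              PySem.Set.add lst (PySem.List.sorted [i, j, year - i - j] (fun x => x) false)
            else lst) lst) (PySem.Set.empty : PySem.Set (List Int)) ↔
      ∃ i ∈ nums, ∃ j ∈ nums, year - i - j ∈ nums ∧
        p = PySem.List.sorted [i, j, year - i - j] (fun x => x) false := by
    intro p
    rw [mem_foldl_or _
        (fun i q => ∃ j ∈ nums, year - i - j ∈ nums ∧
          q = PySem.List.sorted [i, j, year - i - j] (fun x => x) false)
        (fun s a q => by
          rw [mem_foldl_or _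
              (fun j q => year - a - j ∈ nums ∧
                q = PySem.List.sorted [a, j, year - a - j] (fun x => x) false)
              (fun s' b q' => by
                split_ifs with hb
                · simp only [PySem.Set.mem_add]
                  tauto
                · tauto)])]
    simp [PySem.Set.empty]
  unfold pvResA
  rw [PySem.List.foldl_append_singleton_eq_map]
  simp only [List.nil_append, List.mem_map]
  constructor
  · rintro ⟨p, hp, rfl⟩
    obtain ⟨i, hi, j, hj, hk, rfl⟩ := (hset p).mp hp
    have hperm := PySem.List.sorted_perm [i, j, year - i - j] (fun x => x) false
    have hpw := PySem.List.sorted_pairwise [i, j, year - i - j] (fun x => x)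
    have hlen : (PySem.List.sorted [i, j, year - i - j] (fun x => x) false).length = 3 := by
      rw [hperm.length_eq]; rfl
    obtain ⟨a, b, c, hL⟩ := List.length_eq_three.mp hlen
    rw [hL] at hperm hpw
    simp only [List.pairwise_cons, List.mem_cons, List.not_mem_nil, or_false] at hpw
    have hmem : ∀ y ∈ ([a, b, c] : List Int), y ∈ nums := by
      intro y hy
      have := hperm.mem_iff.mp hy
      simp only [List.mem_cons, List.not_mem_nil, or_false] at this
      rcases this with rfl | rfl | rfl
      · exact hi
      · exact hj
      · exact hk
    have hs := hperm.sum_eq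
    simp only [List.sum_cons, List.sum_nil] at hs
    refine ⟨a, b, c, ?_, ?_, hmem a (by simp), hmem b (by simp), hmem c (by simp), by omega, ?_⟩
    · exact hpw.1 b (by tauto)
    · exact hpw.2.1 c (by tauto)
    · rw [hL]
      simp [PySem.List.pyGetD, PySem.List.pyGet?, PySem.List.pyIdx?]
  · rintro ⟨a, b, c, hab, hbc, ha, hb, hc, hsum, rfl⟩
    have h1 : year - a - b = c := by omega
    refine ⟨[a, b, c], (hset _).mpr ⟨a, ha, b, hb, ?_, ?_⟩, ?_⟩
    · rw [h1]; exact hc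
    · rw [h1]
      have hpw' : List.Pairwise (fun p q : Int => (fun x => x) p ≤ (fun x => x) q) [a, b, c] := by
        simp only [List.pairwise_cons, List.mem_cons, List.not_mem_nil, or_false]
        refine ⟨fun y hy => ?_, fun y hy => ?_, by simp⟩
        · rcases hy with rfl | rfl <;> omega
        · rcases hy with rfl; omega
      exact (PySem.List.sorted_eq_self_of_pairwise _ _ hpw').symm
    · simp [PySem.List.pyGetD, PySem.List.pyGet?, PySem.List.pyIdx?]

lemma idx_mono (l : List Int) (hp : l.Pairwise (· < ·)) {a b : Int} (ha : a ∈ l) (hb : b ∈ l)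
    (hab : a ≤ b) : l.idxOf a ≤ l.idxOf b := by
  rcases Nat.lt_or_ge (l.idxOf b) (l.idxOf a) with h | h
  case inr => exact h
  · have h1 : l.idxOf a < l.length := List.idxOf_lt_length_of_mem ha
    have h2 : l.idxOf b < l.length := List.idxOf_lt_length_of_mem hb
    have hlt := List.pairwise_iff_getElem.mp hp (l.idxOf b) (l.idxOf a) h2 h1 h
    rw [List.getElem_idxOf h1, List.getElem_idxOf h2] at hlt
    omega

lemma mem_prodsB (year : Int) (nums : List Int) (x : Int) :
    x ∈ pvProdsB year nums ↔ pvTP year nums x := by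
  unfold pvProdsB pvVals
  simp only [List.mem_flatMap, PySem.List.mem_pyRange_one, List.mem_ite_nil_right,
    List.mem_singleton]
  constructor
  · rintro ⟨i, ⟨h0i, hin⟩, j, ⟨hij, hjn⟩, k, ⟨hjk, hkn⟩, hsum, rfl⟩
    have h0j : (0:Int) ≤ j := le_trans h0i hij
    have h0k : (0:Int) ≤ k := le_trans h0j hjk
    have e_i := PySem.List.pyGetD_eq_getElem (PySem.List.sorted (PySem.Set.ofList nums) (fun x => x) false) (0:Int) h0i hin
    have e_j := PySem.List.pyGetD_eq_getElem (PySem.List.sorted (PySem.Set.ofList nums) (fun x => x) false) (0:Int) h0j hjn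
    have e_k := PySem.List.pyGetD_eq_getElem (PySem.List.sorted (PySem.Set.ofList nums) (fun x => x) false) (0:Int) h0k hkn
    rw [e_i, e_j, e_k] at hsum ⊢
    have hm1 := PySem.List.sorted_id_getElem_mono (PySem.Set.ofList nums)
      (show i.toNat ≤ j.toNat by omega)
      (show j.toNat < (PySem.List.sorted (PySem.Set.ofList nums) (fun x => x) false).length by omega)
    have hm2 := PySem.List.sorted_id_getElem_mono (PySem.Set.ofList nums)
      (show j.toNat ≤ k.toNat by omega)
      (show k.toNat < (PySem.List.sorted (PySem.Set.ofList nums) (fun x => x) false).length by omega)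
    refine ⟨_, _, _, hm1, hm2, ?_, ?_, ?_, hsum, rfl⟩ <;>
      exact (PySem.Set.mem_ofList _ _).mp
        ((PySem.List.mem_sorted _ _ _ _).mp (List.getElem_mem _))
  · rintro ⟨a, b, c, hab, hbc, ha, hb, hc, hsum, rfl⟩
    have hav : a ∈ PySem.List.sorted (PySem.Set.ofList nums) (fun x => x) false :=
      (PySem.List.mem_sorted _ _ _ _).mpr ((PySem.Set.mem_ofList _ _).mpr ha)
    have hbv : b ∈ PySem.List.sorted (PySem.Set.ofList nums) (fun x => x) false :=
      (PySem.List.mem_sorted _ _ _ _).mpr ((PySem.Set.mem_ofList _ _).mpr hb)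
    have hcv : c ∈ PySem.List.sorted (PySem.Set.ofList nums) (fun x => x) false :=
      (PySem.List.mem_sorted _ _ _ _).mpr ((PySem.Set.mem_ofList _ _).mpr hc)
    have hpw := PySem.List.sorted_ofList_pairwise_lt nums
    have h1 := List.idxOf_lt_length_of_mem hav
    have h2 := List.idxOf_lt_length_of_mem hbv
    have h3 := List.idxOf_lt_length_of_mem hcv
    have m1 := idx_mono _ hpw hav hbv hab
    have m2 := idx_mono _ hpw hbv hcv hbc
    refine ⟨((PySem.List.sorted (PySem.Set.ofList nums) (fun x => x) false).idxOf a : Int),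
      ⟨by omega, by omega⟩,
      ((PySem.List.sorted (PySem.Set.ofList nums) (fun x => x) false).idxOf b : Int),
      ⟨by omega, by omega⟩,
      ((PySem.List.sorted (PySem.Set.ofList nums) (fun x => x) false).idxOf c : Int),
      ⟨by omega, by omega⟩, ?_, ?_⟩ <;>
    · simp only [PySem.List.pyGetD_natCast]
      rw [List.getD_eq_getElem _ _ h1, List.getD_eq_getElem _ _ h2, List.getD_eq_getElem _ _ h3,
        List.getElem_idxOf h1, List.getElem_idxOf h2, List.getElem_idxOf h3]
      try first | exact hsum | rfl

lemma maxD_eq_of_mem_iff (l1 l2 : List Int) (h : ∀ x, x ∈ l1 ↔ x ∈ l2) :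
    (PySem.List.max? l1 (fun x => x)).getD 0 = (PySem.List.max? l2 (fun x => x)).getD 0 := by
  cases h1 : PySem.List.max? l1 (fun x => x) with
  | none =>
    cases h2 : PySem.List.max? l2 (fun x => x) with
    | none => rfl
    | some m2 =>
      have hm2 := PySem.List.max?_mem h2
      have : l1 = [] := (PySem.List.max?_eq_none_iff _ _).mp h1
      exact absurd ((h m2).mpr hm2) (by simp [this])
  | some m1 =>
    cases h2 : PySem.List.max? l2 (fun x => x) with
    | none =>
      have hm1 := PySem.List.max?_mem h1
      have : l2 = [] := (PySem.List.max?_eq_none_iff _ _).mp h2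
      exact absurd ((h m1).mp hm1) (by simp [this])
    | some m2 =>
      have hm1 := PySem.List.max?_mem h1
      have hm2 := PySem.List.max?_mem h2
      have h12 : m1 ≤ m2 := PySem.List.max?_isMax h2 m1 ((h m1).mp hm1)
      have h21 : m2 ≤ m1 := PySem.List.max?_isMax h1 m2 ((h m2).mpr hm2)
      simp [le_antisymm h12 h21]

-- ===== VERDICT (by name: the statement is the Claim_ definition above) =====
theorem add_three_is_spec : Claim_equal_add_three_is := by
  intro year nums _ _
  unfold Spec_add_three_is
  rw [add_three_is_eq, add_three_is_alt_eq]
  exact maxD_eq_of_mem_iff _ _ (fun x => (mem_resA year nums x).trans (mem_prodsB year nums x).symm)
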